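-- pv_equiv track=rewrite | github.com/Aoa0/PassFinder | baseline/entropy_based.py | get_strings_of_target_set
-- ===== SOURCE A (Python) =====
-- def get_strings_of_target_set(word, char_set, threshold=5):
--     count = 0
--     letters = ""
--     strings = []
--     for char in word:
--         if char in char_set:
--             letters += char
--             count += 1
--         else:
--             if count > threshold:
--                 strings.append(letters)
--             letters = ""
--             count = 0
--     if count > threshold:
--         strings.append(letters)
--     return strings
-- ===== SOURCE B (Python) =====
-- def get_strings_of_target_set(word, char_set, threshold=5):
--     # two-pointer scan over maximal runs instead of A's count/letters accumulator
--     result = []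
--     n = len(word)
--     i = 0
--     while i < n:
--         if word[i] in char_set:
--             j = i + 1
--             while j < n and word[j] in char_set:
--                 j += 1
--             if j - i > threshold:
--                 result.append(word[i:j])
--             i = j
--         else:
--             i += 1
--     return result
-- ===== Notes on version B (the rewrite author's own statement) =====
-- stated objective: alternative
-- what changed: Replaces A's char-by-char count/letters accumulator state machine with a two-pointer scan that finds each maximal member-run [i,j) at once and slices it out of the word.
-- outside the precondition, e.g. on get_strings_of_target_set('x', {'a'}, -1): A returns ['', ''], B returns []
import Mathlib
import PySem

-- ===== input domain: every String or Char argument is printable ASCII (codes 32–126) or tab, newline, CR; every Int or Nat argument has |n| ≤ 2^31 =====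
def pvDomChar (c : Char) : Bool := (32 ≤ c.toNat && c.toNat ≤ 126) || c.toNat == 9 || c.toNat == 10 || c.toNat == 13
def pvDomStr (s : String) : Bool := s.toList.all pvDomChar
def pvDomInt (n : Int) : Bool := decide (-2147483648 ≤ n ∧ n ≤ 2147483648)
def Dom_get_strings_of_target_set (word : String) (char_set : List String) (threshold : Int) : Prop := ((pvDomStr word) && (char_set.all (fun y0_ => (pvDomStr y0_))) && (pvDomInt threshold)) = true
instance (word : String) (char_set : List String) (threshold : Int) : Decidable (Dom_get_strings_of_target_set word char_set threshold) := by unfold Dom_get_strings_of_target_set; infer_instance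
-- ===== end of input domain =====

-- B re-implements the run extraction as a two-pointer scan over maximal runs (alternative
-- decomposition, same cost); equivalence is proved for nonnegative thresholds (see Pre_).

-- ===== PORT A =====
-- `char in char_set`: membership of the one-character string among the strings of char_set
def pvMemb (c : Char) (char_set : List String) : Bool := char_set.contains (String.ofList [c])

-- one iteration of A's for-loop body; state = (count, letters, strings)
def pvStepA (char_set : List String) (threshold : Int) :
    (Int × String × List String) → Char → (Int × String × List String)
  | (count, letters, strings), char =>
    if pvMemb char char_set then (count + 1, letters.push char, strings)
    else (0, "", if count > threshold then strings ++ [letters] else strings)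

def get_strings_of_target_set (word : String) (char_set : List String) (threshold : Int) : List String :=
  let st := word.toList.foldl (pvStepA char_set threshold) (0, "", [])
  if st.1 > threshold then st.2.2 ++ [st.2.1] else st.2.2

-- ===== PORT B =====
-- inner while loop: advance j while j < n and word[j] in char_set
-- (structural recursion on a fuel counter; fuel = cl.length always suffices)
def pvFindEnd (char_set : List String) (cl : List Char) : Nat → Nat → Nat
  | 0, j => j
  | fuel + 1, j =>
    if h : j < cl.length then
      if pvMemb cl[j] char_set then pvFindEnd char_set cl fuel (j + 1) else j
    else j

-- outer while loop over the index i (fuel decreases once per iteration; i advances by ≥ 1)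
def pvOuter (char_set : List String) (threshold : Int) (cl : List Char) : Nat → Nat → List String
  | 0, _ => []
  | fuel + 1, i =>
    if h : i < cl.length then
      if pvMemb cl[i] char_set then
        let j := pvFindEnd char_set cl cl.length (i + 1)
        (if (j : Int) - (i : Int) > threshold
         then [String.ofList (PySem.List.slice cl (some (i : Int)) (some (j : Int)))]  -- word[i:j]
         else []) ++ pvOuter char_set threshold cl fuel j
      else pvOuter char_set threshold cl fuel (i + 1)
    else []

def get_strings_of_target_set_alt (word : String) (char_set : List String) (threshold : Int) : List String :=
  pvOuter char_set threshold word.toList (word.toList.length + 1) 0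

-- ===== PRECONDITION & SPEC =====
-- Pre_ excludes negative thresholds, a degenerate corner where even empty runs satisfy
-- 'count > threshold' and A emits an empty string at every non-member character while B,
-- which only looks at maximal member-runs, emits none: both readings are defensible and
-- no caller would specify either.
def Pre_get_strings_of_target_set (word : String) (char_set : List String) (threshold : Int) : Prop :=
  0 ≤ threshold
instance (word : String) (char_set : List String) (threshold : Int) : Decidable (Pre_get_strings_of_target_set word char_set threshold) := by unfold Pre_get_strings_of_target_set; infer_instance

def pvWitness_get_strings_of_target_set : String × List String × Int := ("", [], 0)

def Spec_get_strings_of_target_set (word : String) (char_set : List String) (threshold : Int) (out : List String) : Prop := out = get_strings_of_target_set_alt word char_set threshold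
instance (word : String) (char_set : List String) (threshold : Int) (out : List String) : Decidable (Spec_get_strings_of_target_set word char_set threshold out) := by unfold Spec_get_strings_of_target_set; infer_instance

-- ===== CLAIM (what is proved, stated in full; the proofs are below) =====
def Claim_equal_get_strings_of_target_set : Prop := ∀ (word : String) (char_set : List String) (threshold : Int), Dom_get_strings_of_target_set word char_set threshold → Pre_get_strings_of_target_set word char_set threshold → Spec_get_strings_of_target_set word char_set threshold (get_strings_of_target_set word char_set threshold)

-- ===== LEMMAS AND PROOFS =====

-- A's final flush: append the pending run if it is long enough
def pvFlush (threshold : Int) (st : Int × String × List String) : List String :=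
  if st.1 > threshold then st.2.2 ++ [st.2.1] else st.2.2

theorem pvFindEnd_ge (char_set : List String) (cl : List Char) (fuel : Nat) :
    ∀ j : Nat, j ≤ pvFindEnd char_set cl fuel j := by
  induction fuel with
  | zero => intro j; simp [pvFindEnd]
  | succ fuel ih =>
    intro j
    rw [pvFindEnd]
    by_cases hj : j < cl.length
    · rw [dif_pos hj]
      by_cases hm : pvMemb cl[j] char_set = true
      · rw [if_pos hm]; have := ih (j + 1); omega
      · rw [if_neg hm]
    · rw [dif_neg hj]

theorem pvFindEnd_le (char_set : List String) (cl : List Char) (fuel : Nat) :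
    ∀ j : Nat, j ≤ cl.length → pvFindEnd char_set cl fuel j ≤ cl.length := by
  induction fuel with
  | zero => intro j h; simpa [pvFindEnd] using h
  | succ fuel ih =>
    intro j h
    rw [pvFindEnd]
    by_cases hj : j < cl.length
    · rw [dif_pos hj]
      by_cases hm : pvMemb cl[j] char_set = true
      · rw [if_pos hm]; exact ih (j + 1) (by omega)
      · rw [if_neg hm]; exact h
    · rw [dif_neg hj]; exact h

theorem pvFindEnd_mem (char_set : List String) (cl : List Char) (fuel : Nat) :
    ∀ (j k : Nat) (hk : k < cl.length), j ≤ k → k < pvFindEnd char_set cl fuel j →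
      pvMemb cl[k] char_set = true := by
  induction fuel with
  | zero => intro j k hk h1 h2; rw [pvFindEnd] at h2; omega
  | succ fuel ih =>
    intro j k hk h1 h2
    rw [pvFindEnd] at h2
    by_cases hj : j < cl.length
    · rw [dif_pos hj] at h2
      by_cases hm : pvMemb cl[j] char_set = true
      · rw [if_pos hm] at h2
        rcases Nat.eq_or_lt_of_le h1 with rfl | h1'
        · exact hm
        · exact ih (j + 1) k hk h1' h2
      · rw [if_neg hm] at h2; omega
    · rw [dif_neg hj] at h2; omega

theorem pvFindEnd_stop' (char_set : List String) (cl : List Char) (fuel : Nat) :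
    ∀ (j0 j : Nat), cl.length - j0 ≤ fuel → pvFindEnd char_set cl fuel j0 = j →
      ∀ (h : j < cl.length), pvMemb cl[j] char_set = false := by
  induction fuel with
  | zero =>
    intro j0 j hf hj h
    rw [pvFindEnd] at hj
    subst hj
    exact absurd h (by omega)
  | succ fuel ih =>
    intro j0 j hf hj h
    rw [pvFindEnd] at hj
    by_cases hj0 : j0 < cl.length
    · rw [dif_pos hj0] at hj
      by_cases hm : pvMemb cl[j0] char_set = true
      · rw [if_pos hm] at hj; exact ih (j0 + 1) j (by omega) hj h
      · rw [if_neg hm] at hj; subst hj; simpa using hm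
    · rw [dif_neg hj0] at hj; subst hj; exact absurd h (by omega)

theorem pvPush_ofList (L : List Char) (c : Char) :
    (String.ofList L).push c = String.ofList (L ++ [c]) := by
  apply String.toList_injective; simp

theorem pvFoldA_run (char_set : List String) (threshold : Int) (cl : List Char) :
    ∀ (d i j : Nat), j - i = d → i ≤ j → j ≤ cl.length →
    (∀ (k : Nat) (hk : k < cl.length), i ≤ k → k < j → pvMemb cl[k] char_set = true) →
    ∀ (n : Int) (L : List Char) (S : List String),
      List.foldl (pvStepA char_set threshold) (n, String.ofList L, S) (cl.drop i)
        = List.foldl (pvStepA char_set threshold)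
            (n + ((j - i : Nat) : Int), String.ofList (L ++ (cl.drop i).take (j - i)), S)
            (cl.drop j) := by
  intro d
  induction d with
  | zero =>
    intro i j hd hij hjl _ n L S
    have : i = j := by omega
    subst this
    simp
  | succ d ih =>
    intro i j hd hij hjl hmem n L S
    have hil : i < cl.length := by omega
    have hstep : cl.drop i = cl[i] :: cl.drop (i + 1) := List.drop_eq_getElem_cons hil
    rw [hstep]
    simp only [List.foldl_cons]
    have hm : pvMemb cl[i] char_set = true := hmem i hil (le_refl i) (by omega)
    rw [pvStepA]
    rw [if_pos hm, pvPush_ofList]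
    rw [ih (i + 1) j (by omega) (by omega) hjl
        (fun k hk h1 h2 => hmem k hk (by omega) h2) (n + 1) (L ++ [cl[i]]) S]
    have hcast : n + 1 + ((j - (i + 1) : Nat) : Int) = n + ((j - i : Nat) : Int) := by
      omega
    have hlist : L ++ [cl[i]] ++ (cl.drop (i + 1)).take (j - (i + 1))
        = L ++ (cl.drop i).take (j - i) := by
      rw [hstep]
      have : j - i = (j - (i + 1)) + 1 := by omega
      rw [this, List.take_succ_cons, List.append_assoc]
      simp
    rw [hcast, hlist, ← hstep]

theorem pvMain (char_set : List String) (threshold : Int) (ht : 0 ≤ threshold) (cl : List Char) :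
    ∀ (m i : Nat), cl.length - i = m → i ≤ cl.length →
    ∀ (fuel : Nat), cl.length - i < fuel → ∀ (S : List String),
      pvFlush threshold (List.foldl (pvStepA char_set threshold) (0, "", S) (cl.drop i))
        = S ++ pvOuter char_set threshold cl fuel i := by
  intro m
  induction m using Nat.strong_induction_on with
  | _ m ih =>
    intro i hm hil fuel hfuel S
    obtain ⟨f, rfl⟩ : ∃ f, fuel = f + 1 := ⟨fuel - 1, by omega⟩
    by_cases hi : i < cl.length
    · have hstep : cl.drop i = cl[i] :: cl.drop (i + 1) := List.drop_eq_getElem_cons hi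
      by_cases hmem : pvMemb cl[i] char_set = true
      · -- member: a maximal run [i, j) follows
        obtain ⟨j, hjdef⟩ : ∃ j, pvFindEnd char_set cl cl.length (i + 1) = j := ⟨_, rfl⟩
        have hj1 : i + 1 ≤ j := hjdef ▸ pvFindEnd_ge char_set cl cl.length (i + 1)
        have hjl : j ≤ cl.length := hjdef ▸ pvFindEnd_le char_set cl cl.length (i + 1) (by omega)
        have hrun : ∀ (k : Nat) (hk : k < cl.length), i + 1 ≤ k → k < j →
            pvMemb cl[k] char_set = true :=
          fun k hk h1 h2 => pvFindEnd_mem char_set cl cl.length (i + 1) k hk h1 (hjdef.symm ▸ h2)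
        rw [hstep]
        simp only [List.foldl_cons]
        rw [pvStepA, if_pos hmem]
        have hpush : ("" : String).push cl[i] = String.ofList ([] ++ [cl[i]]) := by
          apply String.toList_injective; simp
        rw [hpush]
        rw [pvFoldA_run char_set threshold cl (j - (i + 1)) (i + 1) j rfl (by omega) hjl hrun
            (0 + 1) ([] ++ [cl[i]]) S]
        have hcount : (0 : Int) + 1 + ((j - (i + 1) : Nat) : Int) = ((j - i : Nat) : Int) := by
          omega
        have hrunlist : [] ++ [cl[i]] ++ (cl.drop (i + 1)).take (j - (i + 1))
            = (cl.drop i).take (j - i) := by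
          rw [hstep]
          have : j - i = (j - (i + 1)) + 1 := by omega
          rw [this, List.take_succ_cons]
          simp
        rw [hcount, hrunlist]
        have houter : pvOuter char_set threshold cl (f + 1) i
            = (if (j : Int) - (i : Int) > threshold
               then [String.ofList (PySem.List.slice cl (some (i : Int)) (some (j : Int)))]
               else []) ++ pvOuter char_set threshold cl f j := by
          rw [pvOuter]; simp [hi, hmem]; rw [hjdef]
        have hslice : PySem.List.slice cl (some (i : Int)) (some (j : Int))
            = (cl.drop i).take (j - i) := PySem.List.slice_natCast ..
        have hcmp : ((j : Int) - (i : Int) > threshold) ↔ (((j - i : Nat) : Int) > threshold) := by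
          constructor <;> intro h <;> omega
        by_cases hend : j < cl.length
        · -- run followed by a non-member character at j
          have hstop : pvMemb cl[j] char_set = false :=
            pvFindEnd_stop' char_set cl cl.length (i + 1) j (by omega) hjdef hend
          have hstepj : cl.drop j = cl[j] :: cl.drop (j + 1) := List.drop_eq_getElem_cons hend
          rw [hstepj]
          simp only [List.foldl_cons]
          rw [pvStepA, if_neg (by simp [hstop])]
          obtain ⟨f', rfl⟩ : ∃ f', f = f' + 1 := ⟨f - 1, by omega⟩
          rw [ih (cl.length - (j + 1)) (by omega) (j + 1) rfl (by omega) f' (by omega)]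
          have houterj : pvOuter char_set threshold cl (f' + 1) j
              = pvOuter char_set threshold cl f' (j + 1) := by
            rw [pvOuter]; simp [hend, hstop]
          rw [houter, houterj]
          rw [hslice]
          by_cases hgt : ((j - i : Nat) : Int) > threshold
          · rw [if_pos hgt, if_pos (hcmp.mpr hgt)]; simp
          · rw [if_neg hgt, if_neg (fun h => hgt (hcmp.mp h))]; simp
        · -- run reaches the end of the word: final flush
          have hlen : j = cl.length := by omega
          rw [houter, hlen, List.drop_length, List.foldl_nil]
          rw [hlen] at hslice hcmp
          have houterend : pvOuter char_set threshold cl f cl.length = [] := by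
            cases f <;> simp [pvOuter]
          rw [houterend, hslice, pvFlush]
          by_cases hgt : ((cl.length - i : Nat) : Int) > threshold
          · rw [if_pos hgt, if_pos (hcmp.mpr hgt)]; simp
          · rw [if_neg hgt, if_neg (fun h => hgt (hcmp.mp h))]; simp
      · -- non-member character: state unchanged (count = 0 is not > threshold)
        rw [hstep]
        simp only [List.foldl_cons]
        rw [pvStepA, if_neg hmem, if_neg (by omega)]
        rw [ih (cl.length - (i + 1)) (by omega) (i + 1) rfl (by omega) f (by omega)]
        have : pvOuter char_set threshold cl (f + 1) i
            = pvOuter char_set threshold cl f (i + 1) := by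
          rw [pvOuter]; simp [hi, hmem]
        rw [this]
    · -- i = length: nothing left, flush of the empty pending run is empty
      have : i = cl.length := by omega
      subst this
      rw [List.drop_length, List.foldl_nil, pvFlush]
      rw [if_neg (by omega)]
      have : pvOuter char_set threshold cl (f + 1) cl.length = [] := by
        rw [pvOuter]; simp
      rw [this]
      simp

theorem get_strings_of_target_set_spec : Claim_equal_get_strings_of_target_set := by
  intro word char_set threshold _ hpre
  unfold Spec_get_strings_of_target_set get_strings_of_target_set get_strings_of_target_set_alt
  have h := pvMain char_set threshold hpre word.toList (word.toList.length - 0) 0 rfl (by omega)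
    (word.toList.length + 1) (by omega) []
  simp only [List.drop_zero, List.nil_append] at h
  simpa [pvFlush] using h
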